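-- pv_equiv track=rewrite | github.com/dante-dot1code/labs_Infa | laba 7.py | MaxSumElem
-- ===== SOURCE A (Python) =====
-- def MaxSumElem(matrix):
--     max_sum = float('-inf')
--     max_col_index = 0
--
--     for col in range(len(matrix[0])):  # Идем по столбцам
--         col_sum = 0
--         for row in range(len(matrix)):
--             col_sum += matrix[row][col]
--
--         if col_sum > max_sum:
--             max_sum = col_sum
--             max_col_index = col
--
--     return max_col_index
-- ===== SOURCE B (Python) =====
-- def MaxSumElem(matrix):
--     # Transpose (zip truncates to the shortest row), sum each column,
--     # then stable-sort the column indices by descending sum: the first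
--     # index of the sorted order is the first column with maximal sum.
--     sums = [sum(col) for col in zip(*matrix)]
--     order = sorted(range(len(sums)), key=lambda j: sums[j], reverse=True)
--     return order[0]
-- ===== Notes on version B (the rewrite author's own statement) =====
-- stated objective: alternative
-- what changed: B transposes the matrix with zip, sums the column tuples, and selects the answer by a stable reverse sort of the column indices by sum (first element of the sorted order), instead of A's column-major nested index loops with a running maximum.
-- outside the precondition, e.g. on MaxSumElem([[]]): A returns 0, B raises IndexError
import Mathlib
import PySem

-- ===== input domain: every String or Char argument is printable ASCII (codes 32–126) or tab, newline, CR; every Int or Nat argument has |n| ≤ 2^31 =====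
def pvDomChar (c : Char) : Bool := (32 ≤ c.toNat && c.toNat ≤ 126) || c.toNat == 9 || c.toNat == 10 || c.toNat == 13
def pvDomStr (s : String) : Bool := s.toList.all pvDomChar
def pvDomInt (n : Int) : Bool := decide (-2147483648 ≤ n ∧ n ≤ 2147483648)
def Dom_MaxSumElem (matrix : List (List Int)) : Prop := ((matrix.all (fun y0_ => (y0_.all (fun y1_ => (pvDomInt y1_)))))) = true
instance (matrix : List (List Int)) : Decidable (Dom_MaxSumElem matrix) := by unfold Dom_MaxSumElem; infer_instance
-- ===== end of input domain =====

-- B transposes the matrix with zip, sums the column tuples, and selects the answer as the head of a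
-- stable reverse sort of the column indices by sum, instead of A's nested loops with a running maximum
-- (objective: alternative).

-- ===== PORT A =====
-- max_sum = float('-inf') is ported as Option Int with none = -inf (no float arithmetic occurs:
-- max_sum only ever holds -inf or an int column sum, and 'col_sum > max_sum' is the match below).
-- matrix[row][col] is ported with getD 0; inside Pre_ every access is in range, matching Python exactly.
def MaxSumElem (matrix : List (List Int)) : Int :=
  let st := (List.range (matrix.headD []).length).foldl
    (fun (st : Option Int × Nat) col =>
      let colSum := (List.range matrix.length).foldl
        (fun acc row => acc + ((matrix.getD row []).getD col 0)) 0
      match st.1 with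
      | none => (some colSum, col)
      | some m => if colSum > m then (some colSum, col) else st)
    (none, 0)
  (st.2 : Int)

-- ===== PORT B =====
-- zip(*matrix): transpose truncating to the shortest row (exact port of Python's zip on lists)
def pvZip (m : List (List Int)) : List (List Int) :=
  if m.isEmpty || m.any (fun r => r.isEmpty) then []
  else (m.map (fun r => r.headD 0)) :: pvZip (m.map (fun r => r.tail))
termination_by (m.headD []).length
decreasing_by
  rcases m with _ | ⟨a, t⟩
  · simp at *
  · rename_i h
    have ha : a ≠ [] := by
      intro he; apply h; subst he; simp
    cases a with
    | nil => exact absurd rfl ha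
    | cons x xs => simp

-- sums[j] is ported with getD 0 (always in range); order[0] raises IndexError only when there are
-- no columns — Pre_ excludes that, so headD 0 is exact inside Pre_.
def MaxSumElem_alt (matrix : List (List Int)) : Int :=
  let sums := (pvZip matrix).map (fun c => c.sum)
  let order := PySem.List.sorted (List.range sums.length) (fun j => sums.getD j 0) true
  ((order.headD 0 : ℕ) : Int)

-- ===== PRECONDITION & SPEC =====
-- Pre_ excludes (a) inputs where Python A raises IndexError: the empty matrix (matrix[0]) and
-- matrices with a row shorter than the first row (matrix[row][col]); and (b) matrices whose first
-- row is empty: there A returns its accidental seed 0 although there is no column at all (an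
-- artefact of the argmax initialisation), and B's natural sorted(...)[0] raises IndexError there.
def Pre_MaxSumElem (matrix : List (List Int)) : Prop :=
  matrix ≠ [] ∧ matrix.headD [] ≠ [] ∧ ∀ row ∈ matrix, (matrix.headD []).length ≤ row.length
instance (matrix : List (List Int)) : Decidable (Pre_MaxSumElem matrix) := by
  unfold Pre_MaxSumElem; infer_instance
def pvWitness_MaxSumElem : List (List Int) := [[1, 5, 2], [3, 0, 4]]

def Spec_MaxSumElem (matrix : List (List Int)) (out : Int) : Prop := out = MaxSumElem_alt matrix
instance (matrix : List (List Int)) (out : Int) : Decidable (Spec_MaxSumElem matrix out) := by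
  unfold Spec_MaxSumElem; infer_instance

-- ===== CLAIM (what is proved, stated in full; the proofs are below) =====
def Claim_equal_MaxSumElem : Prop := ∀ (matrix : List (List Int)), Dom_MaxSumElem matrix → Pre_MaxSumElem matrix → Spec_MaxSumElem matrix (MaxSumElem matrix)

-- ===== LEMMAS AND PROOFS =====

-- reading an indexed fold over range L.length as a direct fold over L
theorem pv_foldl_range_getD {α β : Type} (g : β → α → β) (d : α) :
    ∀ (L : List α) (a : β),
      (List.range L.length).foldl (fun acc i => g acc (L.getD i d)) a = L.foldl g a := by
  intro L
  induction L with
  | nil => intro a; simp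
  | cons x xs ih =>
    intro a
    simp only [List.length_cons, List.range_succ_eq_map, List.foldl_cons, List.foldl_map,
      List.getD_cons_zero, List.getD_cons_succ]
    exact ih (g a x)

-- the column-sum function
def pvColSum (matrix : List (List Int)) (col : ℕ) : Int :=
  matrix.foldl (fun acc r => acc + r.getD col 0) 0

-- sum of a mapped list is the accumulating fold A uses
theorem pv_sum_map (f : List Int → Int) :
    ∀ (m : List (List Int)) (a : Int),
      m.foldl (fun acc r => acc + f r) a = a + (m.map f).sum := by
  intro m
  induction m with
  | nil => intro a; simp
  | cons r m ih => intro a; simp [ih, add_assoc]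

-- pvZip computes the columns when the first row is the shortest
theorem pvZip_eq : ∀ (n : ℕ) (m : List (List Int)), m ≠ [] →
    (m.headD []).length = n → (∀ r ∈ m, n ≤ r.length) →
    pvZip m = (List.range n).map (fun j => m.map (fun r => r.getD j 0)) := by
  intro n
  induction n with
  | zero =>
    rintro (_ | ⟨a, t⟩) hne hlen _
    · exact absurd rfl hne
    · have : a = [] := by simpa using List.length_eq_zero_iff.mp (by simpa using hlen)
      subst this
      rw [pvZip]
      simp
  | succ n ih =>
    rintro (_ | ⟨a, t⟩) hne hlen hrows
    · exact absurd rfl hne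
    · have hcond : ¬(((a :: t).isEmpty || (a :: t).any (fun r => r.isEmpty)) = true) := by
        intro hc
        simp only [List.isEmpty_cons, Bool.false_or, List.any_eq_true] at hc
        obtain ⟨r, hr, hre⟩ := hc
        have := hrows r hr
        rw [List.isEmpty_iff] at hre
        subst hre
        simp at this
      rw [pvZip, if_neg hcond]
      have htail : ∀ r ∈ (a :: t).map (fun r => r.tail), n ≤ r.length := by
        intro r hr
        simp only [List.mem_map] at hr
        obtain ⟨r', hr', rfl⟩ := hr
        have := hrows r' hr'
        simp only [List.length_tail]
        omega
      have hh : ((((a :: t).map (fun r => r.tail)).headD []).length) = n := by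
        simp only [List.map_cons, List.headD_cons, List.length_tail]
        simp only [List.headD_cons] at hlen
        omega
      rw [ih ((a :: t).map (fun r => r.tail)) (by simp) hh htail]
      rw [List.range_succ_eq_map]
      conv_rhs => rw [List.map_cons, List.map_map]
      congr 1
      · show (a :: t).map (fun r => r.headD 0) = (a :: t).map (fun r => r.getD 0 0)
        apply List.map_congr_left
        intro r _
        cases r <;> simp
      · apply List.map_congr_left
        intro j _
        simp only [Function.comp]
        rw [List.map_map]
        apply List.map_congr_left
        intro r _
        cases r <;> simp [List.getD]

-- head of an insertion-sort fold started on a nonempty list is the strict-'>' argmax fold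
theorem pv_head_insert (before : ℕ → ℕ → Bool) :
    ∀ (l : List ℕ) (h : ℕ) (t : List ℕ), ∃ t',
      l.foldl (fun acc x => PySem.List.insertBy before x acc) (h :: t)
        = (l.foldl (fun b x => if before x b then x else b) h) :: t' := by
  intro l
  induction l with
  | nil => intro h t; exact ⟨t, rfl⟩
  | cons x l ih =>
    intro h t
    simp only [List.foldl_cons]
    by_cases hb : before x h
    · simp only [PySem.List.insertBy, hb, if_true]
      exact ih x (h :: t)
    · simp only [PySem.List.insertBy, hb, if_false, Bool.false_eq_true]
      exact ih h (PySem.List.insertBy before x t)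

-- the argmax folds agree once A's state carries (some (s b), b)
theorem pv_argmax_eq (s : ℕ → Int) :
    ∀ (l : List ℕ) (b : ℕ),
      l.foldl (fun (st : Option Int × ℕ) col =>
          match st.1 with
          | none => (some (s col), col)
          | some m => if s col > m then (some (s col), col) else st) (some (s b), b)
        = (let b' := l.foldl (fun best j => if s j > s best then j else best) b
           (some (s b'), b')) := by
  intro l
  induction l with
  | nil => intro b; simp
  | cons j l ih =>
    intro b
    simp only [List.foldl_cons]
    by_cases h : s j > s b
    · simp only [if_pos h]
      exact ih j
    · simp only [if_neg h]
      exact ih b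

-- swapping the key used by a plain argmax fold when both keys agree below n
theorem pv_fold_key_congr (s k : ℕ → Int) (n : ℕ) (hk : ∀ j < n, k j = s j) :
    ∀ (l : List ℕ), (∀ x ∈ l, x < n) → ∀ b, b < n →
      l.foldl (fun best j => if s j > s best then j else best) b
        = l.foldl (fun best j => if k best < k j then j else best) b := by
  intro l
  induction l with
  | nil => intro _ b _; simp
  | cons j l ih =>
    intro hl b hbn
    have hjn : j < n := hl j (by simp)
    have hl' : ∀ x ∈ l, x < n := fun x hx => hl x (by simp [hx])
    simp only [List.foldl_cons, hk j hjn, hk b hbn]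
    by_cases h : s j > s b
    · simp only [if_pos h]
      exact ih hl' j hjn
    · simp only [if_neg h]
      exact ih hl' b hbn

theorem MaxSumElem_eq_alt (matrix : List (List Int)) (hpre : Pre_MaxSumElem matrix) :
    MaxSumElem matrix = MaxSumElem_alt matrix := by
  obtain ⟨hne, hhd, hrows⟩ := hpre
  simp only [MaxSumElem, MaxSumElem_alt]
  set n := (matrix.headD []).length with hn
  have hn0 : n ≠ 0 := by
    intro h
    exact hhd (List.length_eq_zero_iff.mp (hn ▸ h))
  -- B's sums list is the list of column sums
  have hzip : pvZip matrix = (List.range n).map (fun j => matrix.map (fun r => r.getD j 0)) :=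
    pvZip_eq n matrix hne rfl hrows
  have hsums : (pvZip matrix).map (fun c => c.sum)
      = (List.range n).map (fun j => pvColSum matrix j) := by
    rw [hzip, List.map_map]
    apply List.map_congr_left
    intro j _
    simp only [Function.comp, pvColSum]
    rw [pv_sum_map (fun r => r.getD j 0) matrix 0, zero_add]
  -- A's inner fold computes pvColSum
  have hinner : ∀ col : ℕ,
      (List.range matrix.length).foldl
        (fun acc row => acc + ((matrix.getD row []).getD col 0)) 0 = pvColSum matrix col := by
    intro col
    exact pv_foldl_range_getD (fun acc r => acc + r.getD col 0) [] matrix 0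
  have hstep : (fun (st : Option Int × ℕ) col =>
      let colSum := (List.range matrix.length).foldl
        (fun acc row => acc + ((matrix.getD row []).getD col 0)) 0
      match st.1 with
      | none => (some colSum, col)
      | some m => if colSum > m then (some colSum, col) else st)
      = (fun (st : Option Int × ℕ) col =>
        match st.1 with
        | none => (some (pvColSum matrix col), col)
        | some m => if pvColSum matrix col > m then (some (pvColSum matrix col), col) else st) := by
    funext st col; simp only [hinner]
  rw [hstep, hsums]
  set s := (List.range n).map (fun j => pvColSum matrix j) with hs
  have hslen : s.length = n := by rw [hs]; simp
  have hget : ∀ j < n, s.getD j 0 = pvColSum matrix j := by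
    intro j hj
    rw [hs]
    exact PySem.List.getD_map_range (fun j => pvColSum matrix j) n j 0 hj
  rw [hslen]
  obtain ⟨m', hm⟩ : ∃ m', n = m' + 1 := ⟨n - 1, by omega⟩
  rw [hm, PySem.List.sorted_rev_eq_foldl_insertBy]
  rw [List.range_succ_eq_map]
  simp only [List.foldl_cons]
  -- A: after column 0 the state is (some (pvColSum matrix 0), 0)
  rw [pv_argmax_eq (pvColSum matrix) ((List.range m').map Nat.succ) 0]
  -- B: the first insertion into [] yields [0]
  have h0 : PySem.List.insertBy
      (fun a b => decide ((fun j => s.getD j 0) b < (fun j => s.getD j 0) a)) 0 ([] : List ℕ)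
      = [0] := by
    simp [PySem.List.insertBy]
  rw [h0]
  obtain ⟨t', ht'⟩ := pv_head_insert
    (fun x b => decide (s.getD b 0 < s.getD x 0)) ((List.range m').map Nat.succ) 0 []
  rw [ht']
  simp only [List.headD_cons]
  have hmem : ∀ x ∈ (List.range m').map Nat.succ, x < m' + 1 := by
    intro x hx
    simp only [List.mem_map, List.mem_range] at hx
    obtain ⟨y, hy, rfl⟩ := hx
    omega
  have := pv_fold_key_congr (pvColSum matrix) (fun j => s.getD j 0) (m' + 1)
    (fun j hj => hget j (by rw [hm]; exact hj)) ((List.range m').map Nat.succ) hmem 0 (by omega)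
  simp only [decide_eq_true_eq]
  rw [← this]

-- ===== VERDICT (by name: the statement is the Claim_ definition above) =====
theorem MaxSumElem_spec : Claim_equal_MaxSumElem := by
  intro matrix _ hpre
  unfold Spec_MaxSumElem
  exact MaxSumElem_eq_alt matrix hpre
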